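-- pv_equiv track=rewrite | github.com/conradoboeira/Port_Scan_IPS_for_SDN | ryu/IPS.py | check_vertical_scan
-- ===== SOURCE A (Python) =====
-- def check_vertical_scan(flows):
--     CPS_ports = (22,23,25,3389)
--     attackers = set()
--     for ip in flows:
--         hosts_acessed = {}
--         for match in flows[ip]:
--             ip_dst = match[0]
--             port_dst = match[1]
--             if(ip_dst in hosts_acessed):
--                 if(port_dst in CPS_ports): hosts_acessed[ip_dst] += 5
--                 else: hosts_acessed[ip_dst] += 3
--             else:
--                 if(port_dst in CPS_ports): hosts_acessed[ip_dst] = 5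
--                 else: hosts_acessed[ip_dst] = 3
--
--
--         for host in hosts_acessed:
--             if(hosts_acessed[host] > 3):
--                 attackers.add(ip)
--     return attackers
-- ===== SOURCE B (Python) =====
-- def check_vertical_scan(flows):
--     CPS_ports = (22, 23, 25, 3389)
--     attackers = set()
--     for ip, matches in flows.items():
--         seen = set()
--         for host, port in matches:
--             if port in CPS_ports or host in seen:
--                 attackers.add(ip)
--                 break
--             seen.add(host)
--     return attackers
-- ===== Notes on version B (the rewrite author's own statement) =====
-- stated objective: simpler
-- what changed: Replaces A's per-ip scoring dictionary plus separate threshold pass by a single early-stopping scan with a seen-set, using that a score exceeds 3 exactly when a CPS port is hit or a destination host repeats.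
import Mathlib
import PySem

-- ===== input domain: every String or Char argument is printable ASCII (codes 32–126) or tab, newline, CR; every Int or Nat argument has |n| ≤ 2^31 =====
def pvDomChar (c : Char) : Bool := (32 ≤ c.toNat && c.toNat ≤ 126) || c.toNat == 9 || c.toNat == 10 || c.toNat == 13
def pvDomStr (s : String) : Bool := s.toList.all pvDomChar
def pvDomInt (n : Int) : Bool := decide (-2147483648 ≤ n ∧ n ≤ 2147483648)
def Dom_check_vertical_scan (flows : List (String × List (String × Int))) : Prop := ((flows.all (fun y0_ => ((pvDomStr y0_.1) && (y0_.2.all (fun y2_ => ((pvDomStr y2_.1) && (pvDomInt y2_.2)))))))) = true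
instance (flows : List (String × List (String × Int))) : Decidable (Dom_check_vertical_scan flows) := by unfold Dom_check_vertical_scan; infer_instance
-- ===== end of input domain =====

-- B replaces A's per-ip scoring dict and threshold pass by a single early-stopping scan with a
-- seen-set (score > 3 ⟺ a CPS-port access or a repeated destination host); objective: simpler.

-- ===== PORT A =====
def pvCpsPorts : List Int := [22, 23, 25, 3389]

-- one step of A's inner scoring loop (body of 'for match in flows[ip]')
def pvAStep (hosts : PySem.Dict String Int) (m : String × Int) : PySem.Dict String Int :=
  if hosts.contains m.1 then
    if pvCpsPorts.contains m.2 then hosts.modify m.1 0 (· + 5)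
    else hosts.modify m.1 0 (· + 3)
  else
    if pvCpsPorts.contains m.2 then hosts.insert m.1 5
    else hosts.insert m.1 3

def check_vertical_scan (flows : List (String × List (String × Int))) : List String :=
  flows.foldl (fun attackers entry =>
    let ip := entry.1
    let hosts := entry.2.foldl pvAStep PySem.Dict.empty
    hosts.keys.foldl (fun att host =>
      if hosts.getD host 0 > 3 then PySem.Set.add att ip else att) attackers)
    PySem.Set.empty

-- ===== PORT B =====
-- B's inner loop: flag as soon as a CPS port or an already-seen host shows up
def pvScan (seen : PySem.Set String) : List (String × Int) → Bool
  | [] => false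
  | m :: rest =>
    if pvCpsPorts.contains m.2 || PySem.Set.contains seen m.1 then true
    else pvScan (PySem.Set.add seen m.1) rest

def check_vertical_scan_alt (flows : List (String × List (String × Int))) : List String :=
  flows.foldl (fun attackers entry =>
    if pvScan PySem.Set.empty entry.2 then PySem.Set.add attackers entry.1 else attackers)
    PySem.Set.empty

-- ===== PRECONDITION & SPEC =====
def Spec_check_vertical_scan (flows : List (String × List (String × Int))) (out : List String) : Prop := out = check_vertical_scan_alt flows
instance (flows : List (String × List (String × Int))) (out : List String) : Decidable (Spec_check_vertical_scan flows out) := by unfold Spec_check_vertical_scan; infer_instance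

-- ===== CLAIM (what is proved, stated in full; the proofs are below) =====
def Claim_equal_check_vertical_scan : Prop := ∀ (flows : List (String × List (String × Int))), Dom_check_vertical_scan flows → Spec_check_vertical_scan flows (check_vertical_scan flows)

-- ===== LEMMAS AND PROOFS =====

-- A's "some host scored above 3" flag
def pvHot (d : PySem.Dict String Int) : Bool := d.keys.any (fun h => d.getD h 0 > 3)

theorem pvSet_add_add (att : PySem.Set String) (ip : String) :
    PySem.Set.add (PySem.Set.add att ip) ip = PySem.Set.add att ip := by
  rw [PySem.Set.add_eq_ite, if_pos (by simp [PySem.Set.mem_add])]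

-- A's threshold pass adds ip once iff some key's score exceeds 3
theorem pvFoldAdd (ks : List String) (d : PySem.Dict String Int) (att : PySem.Set String) (ip : String) :
    ks.foldl (fun att host => if d.getD host 0 > 3 then PySem.Set.add att ip else att) att
      = if ks.any (fun h => d.getD h 0 > 3) then PySem.Set.add att ip else att := by
  induction ks generalizing att with
  | nil => simp
  | cons k t ih =>
    by_cases h : d.getD k 0 > 3
    · simp only [List.foldl_cons, List.any_cons, h, decide_true, Bool.true_or, ih,
        if_true, pvSet_add_add]
      split <;> rfl
    · simp [h, ih]

-- invariant of A's scoring loop: every stored score is ≥ 3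
def pvInv (d : PySem.Dict String Int) : Prop := ∀ k ∈ d.keys, 3 ≤ d.getD k 0

-- keys after one step: unchanged on a seen host, appended on a fresh one
theorem pvKeys_step_contains (d : PySem.Dict String Int) (m : String × Int)
    (hc : d.contains m.1 = true) : (pvAStep d m).keys = d.keys := by
  unfold pvAStep
  rw [if_pos hc]
  split <;> rw [PySem.Dict.keys_modify, PySem.Dict.keys_insert_of_contains _ _ hc]

theorem pvKeys_step_fresh (d : PySem.Dict String Int) (m : String × Int)
    (hc : d.contains m.1 = false) : (pvAStep d m).keys = d.keys ++ [m.1] := by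
  unfold pvAStep
  rw [if_neg (by simp [hc])]
  split <;> rw [PySem.Dict.keys_insert_of_not_contains _ _ hc]

theorem pvInv_step (d : PySem.Dict String Int) (m : String × Int) (h : pvInv d) :
    pvInv (pvAStep d m) := by
  intro k hk
  by_cases hc : d.contains m.1
  · rw [pvKeys_step_contains d m hc] at hk
    unfold pvAStep
    rw [if_pos hc]
    have hv := h k hk
    split <;> rw [PySem.Dict.getD_modify] <;> split <;> rename_i he
    · have := h m.1 ((PySem.Dict.contains_iff_mem_keys d m.1).mp hc); omega
    · exact hv
    · have := h m.1 ((PySem.Dict.contains_iff_mem_keys d m.1).mp hc); omega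
    · exact hv
  · rw [pvKeys_step_fresh d m (by simpa using hc)] at hk
    unfold pvAStep
    rw [if_neg hc]
    split <;> rw [PySem.Dict.getD_insert] <;> split <;> rename_i he <;>
      first
        | omega
        | exact h k (by rcases List.mem_append.mp hk with hk' | hk'; exact hk'; simp at hk'; exact absurd hk' he)

-- once some score exceeds 3, it stays so through one step
theorem pvHot_step (d : PySem.Dict String Int) (m : String × Int) (h : pvHot d = true) :
    pvHot (pvAStep d m) = true := by
  obtain ⟨k, hk, hv⟩ := List.any_eq_true.mp h
  apply List.any_eq_true.mpr
  by_cases hc : d.contains m.1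
  · refine ⟨k, by rw [pvKeys_step_contains d m hc]; exact hk, ?_⟩
    unfold pvAStep
    rw [if_pos hc]
    have h3 := h
    split <;> rw [PySem.Dict.getD_modify] <;> split <;> rename_i he <;>
      first
        | (simp at hv ⊢; subst he; omega)
        | simpa using hv
  · refine ⟨k, by rw [pvKeys_step_fresh d m (by simpa using hc)]; exact List.mem_append_left _ hk, ?_⟩
    unfold pvAStep
    rw [if_neg hc]
    have hne : ¬ k = m.1 := by
      intro e
      exact hc ((PySem.Dict.contains_iff_mem_keys d m.1).mpr (e ▸ hk))
    split <;> rw [PySem.Dict.getD_insert, if_neg hne] <;> simpa using hv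

theorem pvHot_fold (ms : List (String × Int)) (d : PySem.Dict String Int) (h : pvHot d = true) :
    pvHot (ms.foldl pvAStep d) = true := by
  induction ms generalizing d with
  | nil => exact h
  | cons m t ih => exact ih _ (pvHot_step d m h)

-- a seen host or a CPS port pushes some score above 3 in one step
theorem pvHot_step_of_flag (d : PySem.Dict String Int) (m : String × Int) (hInv : pvInv d)
    (hf : pvCpsPorts.contains m.2 = true ∨ d.contains m.1 = true) :
    pvHot (pvAStep d m) = true := by
  apply List.any_eq_true.mpr
  by_cases hc : d.contains m.1
  · have hk := (PySem.Dict.contains_iff_mem_keys d m.1).mp hc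
    have h3 := hInv m.1 hk
    refine ⟨m.1, by rw [pvKeys_step_contains d m hc]; exact hk, ?_⟩
    unfold pvAStep
    rw [if_pos hc]
    split <;> rw [PySem.Dict.getD_modify_self] <;> simp <;> omega
  · have hcps : pvCpsPorts.contains m.2 = true := hf.resolve_right hc
    refine ⟨m.1, by rw [pvKeys_step_fresh d m (by simpa using hc)]; simp, ?_⟩
    unfold pvAStep
    rw [if_neg hc, if_pos hcps, PySem.Dict.getD_insert_self]
    simp

-- the key equivalence: A's flag after the scoring loop = B's early-stopping scan
theorem pvMain (ms : List (String × Int)) (d : PySem.Dict String Int) (hInv : pvInv d) :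
    pvHot (ms.foldl pvAStep d) = (pvHot d || pvScan d.keys ms) := by
  induction ms generalizing d with
  | nil => simp [pvScan]
  | cons m t ih =>
    by_cases hflag : pvCpsPorts.contains m.2 || PySem.Set.contains d.keys m.1
    · have hf : pvCpsPorts.contains m.2 = true ∨ d.contains m.1 = true := by
        rcases Bool.or_eq_true_iff.mp hflag with h | h
        · exact Or.inl h
        · refine Or.inr ((PySem.Dict.contains_iff_mem_keys d m.1).mpr ?_)
          rw [PySem.Set.contains_eq_listContains] at h
          exact List.contains_iff_mem.mp h
      have hd' := pvHot_step_of_flag d m hInv hf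
      have hscan : pvScan d.keys (m :: t) = true := by
        simp only [pvScan]
        rw [if_pos hflag]
      rw [hscan, List.foldl_cons, Bool.or_true, pvHot_fold t _ hd']
    · have hcps : pvCpsPorts.contains m.2 = false := by
        simp only [Bool.or_eq_true_iff, not_or, Bool.not_eq_true] at hflag
        exact hflag.1
      have hns : PySem.Set.contains d.keys m.1 = false := by
        simp only [Bool.or_eq_true_iff, not_or, Bool.not_eq_true] at hflag
        exact hflag.2
      have hc : d.contains m.1 = false := by
        rw [PySem.Set.contains_eq_listContains] at hns
        exact (Bool.eq_false_iff).mpr (fun h =>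
          (Bool.eq_false_iff).mp hns (List.contains_iff_mem.mpr
            ((PySem.Dict.contains_iff_mem_keys d m.1).mp h)))
      have hnm : m.1 ∉ d.keys := fun hm =>
        (Bool.eq_false_iff).mp hc ((PySem.Dict.contains_iff_mem_keys d m.1).mpr hm)
      have hstep : pvAStep d m = d.insert m.1 3 := by
        unfold pvAStep
        rw [if_neg (by simp [hc]), if_neg (by simpa using hcps)]
      have hkeys : (d.insert m.1 3).keys = d.keys ++ [m.1] :=
        PySem.Dict.keys_insert_of_not_contains _ _ hc
      have hHot : pvHot (d.insert m.1 3) = pvHot d := by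
        unfold pvHot
        rw [hkeys, List.any_append]
        have h2 : ∀ x ∈ d.keys, (d.insert m.1 3).getD x 0 = d.getD x 0 := by
          intro x hx
          rw [PySem.Dict.getD_insert, if_neg (fun (e : x = m.1) => hnm (e ▸ hx))]
        rw [Bool.eq_iff_iff]
        simp only [Bool.or_eq_true, List.any_eq_true, List.any_cons, List.any_nil,
          decide_eq_true_eq, PySem.Dict.getD_insert_self]
        constructor
        · rintro (⟨x, hx, hv⟩ | h3)
          · exact ⟨x, hx, by rw [← h2 x hx]; exact hv⟩
          · exact absurd h3 (by simp)
        · rintro ⟨x, hx, hv⟩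
          exact Or.inl ⟨x, hx, by rw [h2 x hx]; exact hv⟩
      have hseen : PySem.Set.add d.keys m.1 = d.keys ++ [m.1] :=
        PySem.Set.add_of_not_mem hnm
      calc pvHot (List.foldl pvAStep d (m :: t))
          = pvHot (List.foldl pvAStep (d.insert m.1 3) t) := by rw [List.foldl_cons, hstep]
        _ = (pvHot (d.insert m.1 3) || pvScan (d.insert m.1 3).keys t) := by
            rw [ih (d.insert m.1 3) (hstep ▸ pvInv_step d m hInv)]
        _ = (pvHot d || pvScan (PySem.Set.add d.keys m.1) t) := by
            rw [hHot, hkeys, ← hseen]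
        _ = (pvHot d || pvScan d.keys (m :: t)) := by
            have : pvScan d.keys (m :: t) = pvScan (PySem.Set.add d.keys m.1) t := by
              simp only [pvScan]
              rw [if_neg hflag]
            rw [this]

-- per-entry agreement of the two loop bodies
theorem pvEntry (ms : List (String × Int)) (att : PySem.Set String) (ip : String) :
    (ms.foldl pvAStep PySem.Dict.empty).keys.foldl (fun att host =>
        if (ms.foldl pvAStep PySem.Dict.empty).getD host 0 > 3 then PySem.Set.add att ip else att) att
      = if pvScan PySem.Set.empty ms then PySem.Set.add att ip else att := by
  have h := pvMain ms PySem.Dict.empty (by intro k hk; simp [PySem.Dict.keys_empty] at hk)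
  rw [pvFoldAdd]
  unfold pvHot at h
  rw [h]
  simp [PySem.Dict.keys_empty, PySem.Set.empty]

theorem check_vertical_scan_eq (flows : List (String × List (String × Int))) :
    check_vertical_scan flows = check_vertical_scan_alt flows := by
  unfold check_vertical_scan check_vertical_scan_alt
  apply PySem.List.foldl_congr_mem
  intro att entry _
  exact pvEntry entry.2 att entry.1

-- ===== VERDICT (by name: the statement is the Claim_ definition above) =====
theorem check_vertical_scan_spec : Claim_equal_check_vertical_scan := by
  intro flows _
  unfold Spec_check_vertical_scan
  exact check_vertical_scan_eq flows
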